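-- pv_equiv track=rewrite | github.com/UMN-VR/GoldyChat | Memory.py | knowledge_log_string_helper
-- ===== SOURCE A (Python) =====
-- def knowledge_log_string_helper(knowledge_log, include_keys):
--     def format_section(prefix):
--         section_items = [v for k, v in knowledge_log.items() if k.startswith(prefix)]
--         if include_keys:
--             formatted_section = '\n'.join(f'{prefix} {i}: {item}' for i, item in enumerate(section_items))
--         else:
--             formatted_section = '\n'.join(section_items)
--         return formatted_section
--
--     formatted_facts = format_section('fact')
--     formatted_info_about_you = format_section('info_about_you')
--     formatted_earlier_info = format_section('earlier_info')
--
--     return f"{formatted_facts}\n{formatted_info_about_you}\n{formatted_earlier_info}"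
-- ===== SOURCE B (Python) =====
-- def knowledge_log_string_helper(knowledge_log, include_keys):
--     # One pass over the items, bucketing values by which prefix the key starts with.
--     facts, infos, earliers = [], [], []
--     for k, v in knowledge_log.items():
--         if k.startswith('fact'):
--             facts.append(v)
--         elif k.startswith('info_about_you'):
--             infos.append(v)
--         elif k.startswith('earlier_info'):
--             earliers.append(v)
--
--     def fmt(prefix, items):
--         if include_keys:
--             return '\n'.join(f'{prefix} {i}: {item}' for i, item in enumerate(items))
--         return '\n'.join(items)
--
--     return f"{fmt('fact', facts)}\n{fmt('info_about_you', infos)}\n{fmt('earlier_info', earliers)}"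
-- ===== Notes on version B (the rewrite author's own statement) =====
-- stated objective: alternative
-- what changed: Replaces three separate filtering scans of the items (one per prefix) by a single bucketing pass that appends each value to the list for the first prefix its key starts with, then formats the three buckets.
import Mathlib
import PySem

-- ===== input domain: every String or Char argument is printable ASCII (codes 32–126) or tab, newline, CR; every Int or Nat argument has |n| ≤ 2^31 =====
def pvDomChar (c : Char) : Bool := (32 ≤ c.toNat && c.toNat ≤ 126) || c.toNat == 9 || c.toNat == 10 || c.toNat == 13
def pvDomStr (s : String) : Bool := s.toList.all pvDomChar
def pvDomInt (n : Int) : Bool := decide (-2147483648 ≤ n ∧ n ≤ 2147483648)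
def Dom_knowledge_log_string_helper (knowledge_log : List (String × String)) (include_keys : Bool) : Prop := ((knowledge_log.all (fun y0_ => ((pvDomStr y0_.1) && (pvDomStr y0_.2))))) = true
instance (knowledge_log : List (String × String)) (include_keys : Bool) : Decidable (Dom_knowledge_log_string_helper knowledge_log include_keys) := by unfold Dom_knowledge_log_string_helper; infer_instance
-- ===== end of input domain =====

-- B replaces A's three filtering scans of the items by one bucketing pass; objective: alternative (same cost class).
-- The dict argument is marshalled as PySem.Dict.ofList of the association list in both ports.

-- ===== PORT A =====
-- A's inner format_section: filter the items by prefix, then join (with enumerated keys if include_keys).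
def pvFormatSection (items : List (String × String)) (include_keys : Bool) (pfx : String) : String :=
  let section_items := (items.filter (fun kv => PySem.Str.startswith kv.1 pfx)).map (fun kv => kv.2)
  if include_keys then
    PySem.Str.join "\n" ((PySem.List.enumerate section_items 0).map
      (fun p => pfx ++ " " ++ PySem.Int.toStr p.1 ++ ": " ++ p.2))
  else
    PySem.Str.join "\n" section_items

def knowledge_log_string_helper (knowledge_log : List (String × String)) (include_keys : Bool) : String :=
  let items := (PySem.Dict.ofList knowledge_log).items
  let formatted_facts := pvFormatSection items include_keys "fact"
  let formatted_info_about_you := pvFormatSection items include_keys "info_about_you"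
  let formatted_earlier_info := pvFormatSection items include_keys "earlier_info"
  formatted_facts ++ "\n" ++ formatted_info_about_you ++ "\n" ++ formatted_earlier_info

-- ===== PORT B =====
-- loop body of B's single bucketing pass (state: the three buckets)
def pvStep (b : List String × List String × List String) (kv : String × String) :
    List String × List String × List String :=
  if PySem.Str.startswith kv.1 "fact" then (b.1 ++ [kv.2], b.2.1, b.2.2)
  else if PySem.Str.startswith kv.1 "info_about_you" then (b.1, b.2.1 ++ [kv.2], b.2.2)
  else if PySem.Str.startswith kv.1 "earlier_info" then (b.1, b.2.1, b.2.2 ++ [kv.2])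
  else b

-- B's fmt: format an already-collected bucket
def pvFmt (include_keys : Bool) (pfx : String) (items : List String) : String :=
  if include_keys then
    PySem.Str.join "\n" ((PySem.List.enumerate items 0).map
      (fun p => pfx ++ " " ++ PySem.Int.toStr p.1 ++ ": " ++ p.2))
  else
    PySem.Str.join "\n" items

def knowledge_log_string_helper_alt (knowledge_log : List (String × String)) (include_keys : Bool) : String :=
  let b := ((PySem.Dict.ofList knowledge_log).items).foldl pvStep ([], [], [])
  pvFmt include_keys "fact" b.1 ++ "\n" ++
    pvFmt include_keys "info_about_you" b.2.1 ++ "\n" ++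
    pvFmt include_keys "earlier_info" b.2.2

-- ===== PRECONDITION & SPEC =====
def Spec_knowledge_log_string_helper (knowledge_log : List (String × String)) (include_keys : Bool) (out : String) : Prop := out = knowledge_log_string_helper_alt knowledge_log include_keys
instance (knowledge_log : List (String × String)) (include_keys : Bool) (out : String) : Decidable (Spec_knowledge_log_string_helper knowledge_log include_keys out) := by unfold Spec_knowledge_log_string_helper; infer_instance

-- ===== CLAIM (what is proved, stated in full; the proofs are below) =====
def Claim_equal_knowledge_log_string_helper : Prop := ∀ (knowledge_log : List (String × String)) (include_keys : Bool), Dom_knowledge_log_string_helper knowledge_log include_keys → Spec_knowledge_log_string_helper knowledge_log include_keys (knowledge_log_string_helper knowledge_log include_keys)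

-- ===== LEMMAS AND PROOFS =====

-- A's section_items for a given prefix
def pvSel (pfx : String) (items : List (String × String)) : List String :=
  (items.filter (fun kv => PySem.Str.startswith kv.1 pfx)).map (fun kv => kv.2)

-- two prefixes with different first characters cannot both be prefixes of k
lemma pv_prefix_ne {k p q : List Char} {a b : Char} (hne : a ≠ b)
    (hp : p.head? = some a) (hq : q.head? = some b)
    (h1 : p <+: k) (h2 : q <+: k) : False := by
  obtain ⟨t1, rfl⟩ := h1
  obtain ⟨t2, e⟩ := h2
  cases p with
  | nil => simp at hp
  | cons x xs =>
    cases q with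
    | nil => simp at hq
    | cons y ys =>
      simp only [List.head?_cons, Option.some.injEq] at hp hq
      simp only [List.cons_append, List.cons.injEq] at e
      exact hne (hp ▸ hq ▸ e.1.symm)

lemma pv_excl (k : List Char) (p q : List Char) (a b : Char) (hne : a ≠ b)
    (hp : p.head? = some a) (hq : q.head? = some b)
    (h : PySem.Chars.startswith k p = true) : PySem.Chars.startswith k q = false := by
  cases hsw : PySem.Chars.startswith k q with
  | false => rfl
  | true =>
    exact (pv_prefix_ne hne hp hq ((PySem.Chars.startswith_iff k p).mp h)
      ((PySem.Chars.startswith_iff k q).mp hsw)).elim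

lemma pv_bucket (l : List (String × String)) (f i e : List String) :
    l.foldl pvStep (f, i, e) =
      (f ++ pvSel "fact" l, i ++ pvSel "info_about_you" l, e ++ pvSel "earlier_info" l) := by
  induction l generalizing f i e with
  | nil => simp [pvSel]
  | cons kv l ih =>
    by_cases h1 : PySem.Chars.startswith kv.1.toList ['f', 'a', 'c', 't'] = true
    · have h2 := pv_excl kv.1.toList ['f', 'a', 'c', 't']
        ['i', 'n', 'f', 'o', '_', 'a', 'b', 'o', 'u', 't', '_', 'y', 'o', 'u'] 'f' 'i'
        (by decide) (by decide) (by decide) h1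
      have h3 := pv_excl kv.1.toList ['f', 'a', 'c', 't']
        ['e', 'a', 'r', 'l', 'i', 'e', 'r', '_', 'i', 'n', 'f', 'o'] 'f' 'e'
        (by decide) (by decide) (by decide) h1
      simp [pvStep, pvSel, h1, h2, h3, ih]
    · simp only [Bool.not_eq_true] at h1
      by_cases h2 : PySem.Chars.startswith kv.1.toList
          ['i', 'n', 'f', 'o', '_', 'a', 'b', 'o', 'u', 't', '_', 'y', 'o', 'u'] = true
      · have h3 := pv_excl kv.1.toList
          ['i', 'n', 'f', 'o', '_', 'a', 'b', 'o', 'u', 't', '_', 'y', 'o', 'u']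
          ['e', 'a', 'r', 'l', 'i', 'e', 'r', '_', 'i', 'n', 'f', 'o'] 'i' 'e'
          (by decide) (by decide) (by decide) h2
        simp [pvStep, pvSel, h1, h2, h3, ih]
      · simp only [Bool.not_eq_true] at h2
        by_cases h3 : PySem.Chars.startswith kv.1.toList
            ['e', 'a', 'r', 'l', 'i', 'e', 'r', '_', 'i', 'n', 'f', 'o'] = true
        · simp [pvStep, pvSel, h1, h2, h3, ih]
        · simp only [Bool.not_eq_true] at h3
          simp [pvStep, pvSel, h1, h2, h3, ih]

lemma pv_fmt_eq (items : List (String × String)) (ik : Bool) (pfx : String) :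
    pvFormatSection items ik pfx = pvFmt ik pfx (pvSel pfx items) := rfl

-- ===== VERDICT (by name: the statement is the Claim_ definition above) =====
theorem knowledge_log_string_helper_spec : Claim_equal_knowledge_log_string_helper := by
  intro knowledge_log include_keys _
  show knowledge_log_string_helper knowledge_log include_keys
      = knowledge_log_string_helper_alt knowledge_log include_keys
  unfold knowledge_log_string_helper knowledge_log_string_helper_alt
  rw [pv_bucket]
  simp [pv_fmt_eq]
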